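-- pv_equiv track=rewrite | github.com/theplatypus/scott | nx_scott_direct/canonize.py | compress_cgraph
-- ===== SOURCE A (Python) =====
-- def compress_cgraph(cgraph: str) -> str:
--     output = ""
--     magnets = {}
--     magnet = ""
--     in_magnet = False
--     cpt = 0
--     depth = 0
--
--     for symbol in cgraph:
--         if not in_magnet:
--             output += symbol
--             if symbol == "{":
--                 in_magnet = True
--         else:
--             if symbol == "{":
--                 depth += 1
--             elif symbol == "}":
--                 if depth == 0:
--                     in_magnet = False
--                     if magnet not in magnets:
--                         cpt += 1
--                         magnets[magnet] = "$%s" % (cpt)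
--                     eq = magnets[magnet]
--                     output += "%s}" % (eq)
--                     magnet = ""
--                 else:
--                     depth -= 1
--             else:
--                 magnet += symbol
--
--     return output
-- ===== SOURCE B (Python) =====
-- def compress_cgraph(cgraph: str) -> str:
--     # Phase 1: tokenize into literal chunks and magnet contents.
--     # A token is (False, literal_text) or (True, magnet_content).
--     tokens = []
--     lit = []
--     i, n = 0, len(cgraph)
--     while i < n:
--         c = cgraph[i]
--         i += 1
--         lit.append(c)
--         if c == "{":
--             tokens.append((False, "".join(lit)))
--             lit = []
--             depth = 0
--             content = []
--             closed = False
--             while i < n: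
--                 d = cgraph[i]
--                 i += 1
--                 if d == "{":
--                     depth += 1
--                 elif d == "}":
--                     if depth == 0:
--                         closed = True
--                         break
--                     depth -= 1
--                 else:
--                     content.append(d)
--             if closed:
--                 tokens.append((True, "".join(content)))
--             # unterminated magnet: content is dropped
--     tokens.append((False, "".join(lit)))
--     # Phase 2: number distinct magnet contents in order of first appearance.
--     magnets = {}
--     out = []
--     for is_magnet, text in tokens:
--         if is_magnet:
--             if text not in magnets:
--                 magnets[text] = "$%s" % (len(magnets) + 1)
--             out.append(magnets[text] + "}")
--         else:
--             out.append(text)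
--     return "".join(out)
-- ===== Notes on version B (the rewrite author's own statement) =====
-- stated objective: alternative
-- what changed: Replaced A's single char-by-char state machine (in_magnet flag, running counter, incremental string concatenation) by a two-phase design: a tokenizer that splits the string into literal chunks and magnet contents, then a separate rendering pass that numbers distinct magnets by dict size and joins the pieces.
import Mathlib
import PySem

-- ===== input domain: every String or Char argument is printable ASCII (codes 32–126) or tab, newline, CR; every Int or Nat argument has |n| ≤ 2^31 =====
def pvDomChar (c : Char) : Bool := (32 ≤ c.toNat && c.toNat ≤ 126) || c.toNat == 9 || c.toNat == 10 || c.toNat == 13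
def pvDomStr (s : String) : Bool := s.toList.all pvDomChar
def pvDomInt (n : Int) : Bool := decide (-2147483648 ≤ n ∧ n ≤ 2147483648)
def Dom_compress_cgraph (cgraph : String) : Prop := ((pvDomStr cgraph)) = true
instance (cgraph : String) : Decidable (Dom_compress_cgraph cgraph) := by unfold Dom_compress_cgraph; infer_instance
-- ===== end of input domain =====

-- B replaces A's one-pass char state machine by a tokenize-then-render two-phase design (objective: alternative decomposition).

-- ===== PORT A =====
-- A's for-loop over the characters, state threaded exactly as in the Python.
def pvGoA : List Char → List Char → PySem.Dict String String → List Char → Bool → Int → Int → List Char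
  | [], output, _, _, _, _, _ => output
  | c :: rest, output, magnets, magnet, in_magnet, cpt, depth =>
    if in_magnet = false then
      pvGoA rest (output ++ [c]) magnets magnet (c == '{') cpt depth
    else if c == '{' then
      pvGoA rest output magnets magnet true cpt (depth + 1)
    else if c == '}' then
      if depth == 0 then
        let key := String.ofList magnet
        let p :=
          if magnets.contains key then (magnets, cpt)
          else (magnets.insert key ("$" ++ PySem.Int.toStr (cpt + 1)), cpt + 1)
        pvGoA rest (output ++ (p.1.getD key "").toList ++ ['}']) p.1 [] false p.2 depth
      else
        pvGoA rest output magnets magnet true cpt (depth - 1)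
    else
      pvGoA rest output magnets (magnet ++ [c]) true cpt depth

def compress_cgraph (cgraph : String) : String :=
  String.ofList (pvGoA cgraph.toList [] PySem.Dict.empty [] false 0 0)

-- ===== PORT B =====
-- B's inner while-loop: consume a magnet body, returning (closed content?, remaining input).
def pvTokMag : List Char → Int → List Char → Option (List Char) × List Char
  | [], _, _ => (none, [])
  | d :: rest, depth, content =>
    if d == '{' then pvTokMag rest (depth + 1) content
    else if d == '}' then
      if depth == 0 then (some content, rest)
      else pvTokMag rest (depth - 1) content
    else pvTokMag rest depth (content ++ [d])

-- the remaining input is a suffix (needed by pvTokLit's termination)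
theorem pvTokMag_len : ∀ (cs : List Char) (depth : Int) (content : List Char),
    (pvTokMag cs depth content).2.length ≤ cs.length := by
  intro cs
  induction cs with
  | nil => intro _ _; simp [pvTokMag]
  | cons d rest ih =>
    intro depth content
    simp only [pvTokMag]
    split_ifs with h1 h2 h3
    · exact (ih _ _).trans (by simp)
    · simp
    · exact (ih _ _).trans (by simp)
    · exact (ih _ _).trans (by simp)

-- B's outer while-loop: split into literal chunks (ending at '{') and magnet contents.
def pvTokLit : List Char → List Char → List (Bool × List Char)
  | [], lit => [(false, lit)]
  | c :: rest, lit =>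
    if c == '{' then
      match h : pvTokMag rest 0 [] with
      | (some content, rest') => (false, lit ++ [c]) :: (true, content) :: pvTokLit rest' []
      | (none, rest') => (false, lit ++ [c]) :: pvTokLit rest' []
    else pvTokLit rest (lit ++ [c])
termination_by cs _ => cs.length
decreasing_by
  · have := pvTokMag_len rest 0 []
    rw [h] at this
    simpa using Nat.lt_succ_of_le this
  · have := pvTokMag_len rest 0 []
    rw [h] at this
    simpa using Nat.lt_succ_of_le this
  · simp

-- B's second pass: number distinct magnets and join the pieces.
def pvRender : List (Bool × List Char) → PySem.Dict String String → List Char → List Char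
  | [], _, out => out
  | (isMag, text) :: ts, magnets, out =>
    if isMag then
      let key := String.ofList text
      let magnets' :=
        if magnets.contains key then magnets
        else magnets.insert key ("$" ++ PySem.Int.toStr ((magnets.size : Int) + 1))
      pvRender ts magnets' (out ++ (magnets'.getD key "").toList ++ ['}'])
    else pvRender ts magnets (out ++ text)

def compress_cgraph_alt (cgraph : String) : String :=
  String.ofList (pvRender (pvTokLit cgraph.toList []) PySem.Dict.empty [])

-- ===== PRECONDITION & SPEC =====
def Spec_compress_cgraph (cgraph : String) (out : String) : Prop := out = compress_cgraph_alt cgraph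
instance (cgraph : String) (out : String) : Decidable (Spec_compress_cgraph cgraph out) := by unfold Spec_compress_cgraph; infer_instance

-- ===== CLAIM (what is proved, stated in full; the proofs are below) =====
def Claim_equal_compress_cgraph : Prop := ∀ (cgraph : String), Dom_compress_cgraph cgraph → Spec_compress_cgraph cgraph (compress_cgraph cgraph)

-- ===== LEMMAS AND PROOFS =====

-- if the magnet never closes, nothing remains
theorem pvTokMag_none : ∀ (cs : List Char) (depth : Int) (content : List Char) (r : List Char),
    pvTokMag cs depth content = (none, r) → r = [] := by
  intro cs
  induction cs with
  | nil => intro _ _ r h; simpa [pvTokMag] using congrArg Prod.snd h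
  | cons d rest ih =>
    intro depth content r h
    simp only [pvTokMag] at h
    split_ifs at h with h1 h2 h3
    · exact ih _ _ _ h
    · simp at h
    · exact ih _ _ _ h
    · exact ih _ _ _ h

-- what A does after pvTokMag has consumed one magnet (proof-only helper)
def pvContA (r : Option (List Char) × List Char) (out : List Char)
    (magnets : PySem.Dict String String) (cpt : Int) : List Char :=
  match r.1 with
  | none => out
  | some content =>
    let key := String.ofList content
    if magnets.contains key then
      pvGoA r.2 (out ++ (magnets.getD key "").toList ++ ['}']) magnets [] false cpt 0
    else
      let m' := magnets.insert key ("$" ++ PySem.Int.toStr (cpt + 1))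
      pvGoA r.2 (out ++ (m'.getD key "").toList ++ ['}']) m' [] false (cpt + 1) 0

-- A's run in magnet mode equals consuming one magnet via pvTokMag, then continuing
theorem pvGoA_mag : ∀ (cs out : List Char) (magnets : PySem.Dict String String)
    (mg : List Char) (cpt depth : Int),
    pvGoA cs out magnets mg true cpt depth =
      pvContA (pvTokMag cs depth mg) out magnets cpt := by
  intro cs
  induction cs with
  | nil => intro out magnets mg cpt depth; simp [pvGoA, pvTokMag, pvContA]
  | cons c rest ih =>
    intro out magnets mg cpt depth
    simp only [pvGoA, pvTokMag, Bool.true_eq_false, if_false]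
    split_ifs with h1 h2 h3 h4
    · exact ih out magnets mg cpt (depth + 1)
    · have hd : depth = 0 := by simpa using h3
      subst hd
      simp [pvContA, h4]
    · have hd : depth = 0 := by simpa using h3
      subst hd
      simp [pvContA, h4]
    · exact ih out magnets mg cpt (depth - 1)
    · exact ih out magnets (mg ++ [c]) cpt depth

-- the main simulation: A's literal mode vs B's tokenize-then-render, with cpt = |magnets|
theorem pvGoA_lit : ∀ (n : Nat) (cs : List Char), cs.length ≤ n →
    ∀ (out lit : List Char) (magnets : PySem.Dict String String) (cpt : Int),
    cpt = (magnets.size : Int) →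
    pvGoA cs (out ++ lit) magnets [] false cpt 0 = pvRender (pvTokLit cs lit) magnets out := by
  intro n
  induction n with
  | zero =>
    intro cs hcs out lit magnets cpt hcpt
    have : cs = [] := List.eq_nil_of_length_eq_zero (Nat.le_zero.mp hcs)
    subst this
    simp [pvGoA, pvTokLit, pvRender]
  | succ n ih =>
    intro cs hcs out lit magnets cpt hcpt
    cases cs with
    | nil => simp [pvGoA, pvTokLit, pvRender]
    | cons c rest =>
      have hr : rest.length ≤ n := by simpa using hcs
      by_cases hc : c = '{'
      · subst hc
        simp only [pvGoA, pvTokLit, beq_self_eq_true, if_true]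
        rw [show (out ++ lit) ++ ['{'] = out ++ (lit ++ ['{']) by simp, pvGoA_mag]
        rcases hm : pvTokMag rest 0 [] with ⟨oc, rest'⟩
        have hlen : rest'.length ≤ rest.length := by
          have := pvTokMag_len rest 0 []; rw [hm] at this; exact this
        cases oc with
        | none =>
          have : rest' = [] := pvTokMag_none rest 0 [] rest' hm
          subst this
          simp [pvContA, pvTokLit, pvRender]
        | some content =>
          simp only [pvContA]
          set key := String.ofList content with hkey
          by_cases hcon : magnets.contains key
          · simp only [pvRender, Bool.false_eq_true, if_false, if_true, ← hkey, if_pos hcon]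
            have := ih rest' (hlen.trans hr)
              (out ++ (lit ++ ['{']) ++ (magnets.getD key "").toList ++ ['}']) [] magnets cpt hcpt
            simpa using this
          · simp only [pvRender, Bool.false_eq_true, if_false, if_true, ← hkey, if_neg hcon, hcpt]
            have hsz : ((magnets.size : Int) + 1) =
                ((magnets.insert key ("$" ++ PySem.Int.toStr ((magnets.size : Int) + 1))).size : Int) := by
              rw [PySem.Dict.size_insert]
              simp [hcon]
            have := ih rest' (hlen.trans hr)
              (out ++ (lit ++ ['{']) ++
                ((magnets.insert key ("$" ++ PySem.Int.toStr ((magnets.size : Int) + 1))).getD key "").toList ++ ['}'])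
              [] (magnets.insert key ("$" ++ PySem.Int.toStr ((magnets.size : Int) + 1)))
              ((magnets.size : Int) + 1) hsz
            simpa using this
      · have hcb : (c == '{') = false := by simp [hc]
        simp only [pvGoA, pvTokLit, hcb, Bool.false_eq_true, if_false]
        rw [show (out ++ lit) ++ [c] = out ++ (lit ++ [c]) by simp]
        exact ih rest hr out (lit ++ [c]) magnets cpt hcpt

-- ===== VERDICT (by name: the statement is the Claim_ definition above) =====
theorem compress_cgraph_spec : Claim_equal_compress_cgraph := by
  intro cgraph _
  unfold Spec_compress_cgraph compress_cgraph compress_cgraph_alt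
  congr 1
  have := pvGoA_lit cgraph.toList.length cgraph.toList le_rfl [] [] PySem.Dict.empty 0 (by simp)
  simpa using this
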